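-- pv_equiv track=rewrite | github.com/hamzatartori/HTML-Topic-Model | topic_coherence/segmentation.py | s_one_pre
-- ===== SOURCE A (Python) =====
-- def s_one_pre(topics):
--
--     s_one_pre_res = []
--
--     for top_words in topics:
--         s_one_pre_t = []
--         for w_prime_index, w_prime in enumerate(top_words[1:]):
--             for w_star in top_words[:w_prime_index + 1]:
--                 s_one_pre_t.append((w_prime, w_star))
--         s_one_pre_res.append(s_one_pre_t)
--
--     return s_one_pre_res
-- ===== SOURCE B (Python) =====
-- def s_one_pre(topics):
--     return [_topic_pairs(t) for t in topics]
--
--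
-- def _topic_pairs(ws):
--     # Recursion on the initial segment: pairs of ws = pairs of ws[:-1],
--     # followed by the last word paired with every earlier word.
--     if len(ws) <= 1:
--         return []
--     *init, last = ws
--     return _topic_pairs(init) + [(last, s) for s in init]
-- ===== Notes on version B (the rewrite author's own statement) =====
-- stated objective: alternative
-- what changed: Replaces A's iterative nested loops (enumerate over top_words[1:] with a re-sliced prefix per word) by structural recursion on the initial segment: pairs(ws) = pairs(ws[:-1]) + [(last, s) for s in ws[:-1]], building the result back-to-front by recursion instead of front-to-back by indexed loops.
import Mathlib
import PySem

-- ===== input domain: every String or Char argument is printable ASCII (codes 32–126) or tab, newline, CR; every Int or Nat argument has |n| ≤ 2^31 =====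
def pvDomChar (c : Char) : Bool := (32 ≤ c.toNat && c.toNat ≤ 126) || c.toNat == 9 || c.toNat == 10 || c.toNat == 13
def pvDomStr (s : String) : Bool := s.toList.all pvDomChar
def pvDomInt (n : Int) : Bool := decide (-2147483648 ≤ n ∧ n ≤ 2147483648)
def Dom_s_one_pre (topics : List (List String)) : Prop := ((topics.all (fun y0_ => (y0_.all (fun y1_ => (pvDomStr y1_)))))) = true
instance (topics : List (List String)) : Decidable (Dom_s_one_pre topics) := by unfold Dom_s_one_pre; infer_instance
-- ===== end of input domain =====

-- B replaces A's iterative nested loops (enumerate over the tail, re-slicing a prefix per word)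
-- by structural recursion on the initial segment: pairs(ws) = pairs(ws[:-1]) ++ last-paired-with-init.

-- ===== PORT A =====
-- inner loops of A: for w_prime over top_words[1:] with index, for w_star over top_words[:i+1]
def s_one_pre_topic (tw : List String) : List (String × String) :=
  (PySem.List.enumerate (PySem.List.slice tw (some 1) none)).foldl
    (fun acc p =>
      (PySem.List.slice tw none (some (p.1 + 1))).foldl
        (fun acc2 ws => acc2 ++ [(p.2, ws)]) acc) []

def s_one_pre (topics : List (List String)) : List (List (String × String)) :=
  topics.foldl (fun res tw => res ++ [s_one_pre_topic tw]) []

-- ===== PORT B =====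
-- B's helper _topic_pairs: recursion on ws[:-1] ('*init, last = ws'), base case len(ws) <= 1
def s_one_pre_alt_topic (ws : List String) : List (String × String) :=
  if _h : ws.length ≤ 1 then []
  else s_one_pre_alt_topic ws.dropLast ++ ws.dropLast.map (fun s => (ws.getLast!, s))
termination_by ws.length
decreasing_by simp; omega

def s_one_pre_alt (topics : List (List String)) : List (List (String × String)) :=
  topics.map s_one_pre_alt_topic

-- ===== PRECONDITION & SPEC =====
def Spec_s_one_pre (topics : List (List String)) (out : List (List (String × String))) : Prop := out = s_one_pre_alt topics
instance (topics : List (List String)) (out : List (List (String × String))) : Decidable (Spec_s_one_pre topics out) := by unfold Spec_s_one_pre; infer_instance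

-- ===== CLAIM (what is proved, stated in full; the proofs are below) =====
def Claim_equal_s_one_pre : Prop := ∀ (topics : List (List String)), Dom_s_one_pre topics → Spec_s_one_pre topics (s_one_pre topics)

-- ===== LEMMAS AND PROOFS =====

-- common characterisation: pairs produced when 'pre' has already been seen and 'tw' remains
def pvPairs (pre tw : List String) : List (String × String) :=
  match tw with
  | [] => []
  | w :: rest => pre.map (fun s => (w, s)) ++ pvPairs (pre ++ [w]) rest

theorem pvPairs_append (w : String) (tw : List String) : ∀ (pre : List String),
    pvPairs pre (tw ++ [w]) = pvPairs pre tw ++ (pre ++ tw).map (fun s => (w, s)) := by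
  induction tw with
  | nil => intro pre; simp [pvPairs]
  | cons x rest ih =>
      intro pre
      simp only [List.cons_append, pvPairs, ih (pre ++ [x]), List.map_append,
        List.append_assoc]
      simp

theorem b_topic_eq_pvPairs (ws : List String) : s_one_pre_alt_topic ws = pvPairs [] ws := by
  induction ws using List.reverseRecOn with
  | nil => simp [s_one_pre_alt_topic, pvPairs]
  | append_singleton init w ih =>
      rw [s_one_pre_alt_topic]
      by_cases h : (init ++ [w]).length ≤ 1
      · have : init = [] := by
          rcases init with _ | ⟨a, t⟩
          · rfl
          · simp at h
        subst this
        simp [pvPairs]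
      · have hlast : (init ++ [w]).getLast! = w := by
          rw [List.getLast!_eq_getLast?_getD]; simp
        rw [dif_neg h, List.dropLast_concat, hlast, ih, pvPairs_append]
        simp

theorem a_topic_aux (t : List String) : ∀ (k : Nat) (full : List String)
    (acc : List (String × String)), full.drop (k + 1) = t →
    (PySem.List.enumerate t (k : Int)).foldl
      (fun acc p =>
        (PySem.List.slice full none (some (p.1 + 1))).foldl
          (fun acc2 ws => acc2 ++ [(p.2, ws)]) acc) acc
    = acc ++ pvPairs (full.take (k + 1)) t := by
  induction t with
  | nil => intro k full acc _; simp [PySem.List.enumerate, pvPairs]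
  | cons w rest ih =>
      intro k full acc hdrop
      have hget : full[k + 1]? = some w := by
        have h : (full.drop (k + 1))[0]? = full[(k + 1) + 0]? := List.getElem?_drop
        rw [hdrop] at h
        simpa using h.symm
      have hdrop' : full.drop (k + 2) = rest := by
        have : full.drop (k + 2) = (full.drop (k + 1)).drop 1 := by
          rw [List.drop_drop]
        simp [this, hdrop]
      have htake : full.take (k + 2) = full.take (k + 1) ++ [w] := by
        rw [List.take_add_one, hget]; rfl
      rw [PySem.List.enumerate_cons, List.foldl_cons]
      have hslice : PySem.List.slice full none (some ((k : Int) + 1)) = full.take (k + 1) := by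
        have := PySem.List.slice_to_natCast full (k + 1)
        simpa using this
      rw [hslice, PySem.List.foldl_append_singleton_eq_map]
      have hcast : (k : Int) + 1 = ((k + 1 : Nat) : Int) := by push_cast; ring
      rw [hcast, ih (k + 1) full _ hdrop', pvPairs, htake, List.append_assoc]

theorem topic_eq (tw : List String) : s_one_pre_topic tw = s_one_pre_alt_topic tw := by
  rw [b_topic_eq_pvPairs]
  cases tw with
  | nil => simp [s_one_pre_topic, PySem.List.slice, pvPairs]
  | cons h t =>
      unfold s_one_pre_topic
      rw [PySem.List.slice_from_one]
      have := a_topic_aux t 0 (h :: t) [] (by simp)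
      simp only [Int.natCast_zero] at this
      simp only [List.tail_cons]
      rw [this]
      simp [pvPairs]

-- ===== VERDICT (by name: the statement is the Claim_ definition above) =====
theorem s_one_pre_spec : Claim_equal_s_one_pre := by
  intro topics _
  unfold Spec_s_one_pre s_one_pre s_one_pre_alt
  rw [PySem.List.foldl_append_singleton_eq_map]
  simp [topic_eq]
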